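-- pv_equiv track=rewrite | github.com/seoul-ssafy-class-2-studyclub/Eunsung | Line/yogiyo3.py | solution
-- ===== SOURCE A (Python) =====
-- def solution(S):
--     dic = dict()
--     cnt = 1
--     for s in S:
--         if dic.get(s) != None:
--             dic = dict()
--             cnt += 1
--             dic[s] = 1
--             continue
--
--         else:
--             dic[s] = 1
--
--     return cnt
-- ===== SOURCE B (Python) =====
-- def solution(S):
--     # Stage 1: for each position, record the index of the previous occurrence
--     # of the same character (-1 if none), using a last-occurrence map.
--     last = {}
--     prev = []
--     for i, c in enumerate(S):
--         prev.append(last.get(c, -1))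
--         last[c] = i
--     # Stage 2: pure integer scan over prev: a new segment starts at i exactly
--     # when the previous occurrence of S[i] lies inside the current segment.
--     cnt = 1
--     start = 0
--     for i, p in enumerate(prev):
--         if p >= start:
--             cnt += 1
--             start = i
--     return cnt
-- ===== Notes on version B (the rewrite author's own statement) =====
-- stated objective: alternative
-- what changed: Replaces A's single pass carrying a resettable dict-as-set by a two-stage algorithm: first build a previous-occurrence index array via a last-occurrence map, then a pure integer scan over that array counting positions whose previous occurrence falls inside the current segment.
import Mathlib
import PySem

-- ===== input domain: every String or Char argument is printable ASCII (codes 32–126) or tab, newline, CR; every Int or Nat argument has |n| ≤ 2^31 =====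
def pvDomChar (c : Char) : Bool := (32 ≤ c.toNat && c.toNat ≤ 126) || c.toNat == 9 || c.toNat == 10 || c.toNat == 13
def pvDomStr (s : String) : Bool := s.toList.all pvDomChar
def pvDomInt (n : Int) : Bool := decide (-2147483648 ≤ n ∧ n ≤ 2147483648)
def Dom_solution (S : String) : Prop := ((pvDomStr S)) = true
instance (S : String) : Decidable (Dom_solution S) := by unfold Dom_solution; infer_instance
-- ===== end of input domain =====

-- B replaces A's one-pass fold carrying a resettable dict by a two-stage algorithm:
-- first a previous-occurrence index array, then a pure integer threshold scan; same cost.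

-- ===== PORT A =====
-- A: one pass over S with a dict 'dic' and counter 'cnt'; on a repeated char reset the dict,
-- bump cnt, and re-insert the char.
def solution (S : String) : Int :=
  (S.toList.foldl
    (fun (st : PySem.Dict Char Int × Int) s =>
      if st.1.get? s ≠ none then
        ((PySem.Dict.empty.insert s 1 : PySem.Dict Char Int), st.2 + 1)
      else
        (st.1.insert s 1, st.2))
    ((PySem.Dict.empty : PySem.Dict Char Int), 1)).2

-- ===== PORT B =====
-- Stage 1: prev[i] = index of previous occurrence of S[i] (-1 if none), via a last-occurrence map.
-- Stage 2: integer scan over prev: a new segment starts at i exactly when prev[i] >= start.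
def solution_alt (S : String) : Int :=
  let st1 :=
    (PySem.List.enumerate S.toList 0).foldl
      (fun (st : List Int × PySem.Dict Char Int) ic =>
        (st.1 ++ [st.2.getD ic.2 (-1)], st.2.insert ic.2 ic.1))
      ([], (PySem.Dict.empty : PySem.Dict Char Int))
  let prev := st1.1
  ((PySem.List.enumerate prev 0).foldl
    (fun (st : Int × Int) ip =>
      if st.2 ≤ ip.2 then (st.1 + 1, ip.1) else st)
    (1, 0)).1

-- ===== PRECONDITION & SPEC =====
def Spec_solution (S : String) (out : Int) : Prop := out = solution_alt S
instance (S : String) (out : Int) : Decidable (Spec_solution S out) := by unfold Spec_solution; infer_instance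

-- ===== CLAIM =====
def Claim_equal_solution : Prop := ∀ (S : String), Dom_solution S → Spec_solution S (solution S)

-- ===== LEMMAS AND PROOFS =====

-- number of duplicate-stops produced by scanning l with current seen-state 'seen'
def breaks (seen : PySem.Set Char) : List Char → Int
  | [] => 0
  | c :: rest =>
    if seen.contains c then 1 + breaks (PySem.Set.empty.add c) rest
    else breaks (seen.add c) rest

theorem foldA_eq_breaks (l : List Char) (d : PySem.Dict Char Int) (seen : PySem.Set Char)
    (cnt : Int) (hinv : ∀ c, (d.get? c).isSome = seen.contains c) :
    (l.foldl
      (fun (st : PySem.Dict Char Int × Int) s =>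
        if st.1.get? s ≠ none then
          ((PySem.Dict.empty.insert s 1 : PySem.Dict Char Int), st.2 + 1)
        else
          (st.1.insert s 1, st.2))
      (d, cnt)).2 = cnt + breaks seen l := by
  induction l generalizing d seen cnt with
  | nil => simp [breaks]
  | cons c rest ih =>
    have hins : ∀ (d' : PySem.Dict Char Int) (s' : PySem.Set Char),
        (∀ x, (d'.get? x).isSome = s'.contains x) →
        ∀ x, ((d'.insert c 1).get? x).isSome = (s'.add c).contains x := by
      intro d' s' h x
      by_cases hx : x = c
      · subst hx
        rw [PySem.Dict.get?_insert_self]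
        have : x ∈ s'.add x := (PySem.Set.mem_add s' x x).mpr (Or.inr rfl)
        simp [this]
      · rw [PySem.Dict.get?_insert_of_ne d' 1 hx, h x]
        have : x ∈ s'.add c ↔ x ∈ s' := by
          rw [PySem.Set.mem_add]
          exact ⟨fun h' => h'.resolve_right hx, Or.inl⟩
        simp [this]
    by_cases hc : seen.contains c = true
    · have hd : d.get? c ≠ none := by
        have := hinv c
        rw [hc] at this
        exact Option.ne_none_iff_isSome.mpr this
      simp only [List.foldl_cons, hd, if_pos, ne_eq, not_false_iff]
      have hempty : ∀ x, ((PySem.Dict.empty : PySem.Dict Char Int).get? x).isSome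
          = (PySem.Set.empty : PySem.Set Char).contains x := by
        intro x; rfl
      rw [ih _ _ _ (hins PySem.Dict.empty PySem.Set.empty hempty)]
      simp only [breaks]
      rw [if_pos hc]
      ring
    · have hd : ¬ d.get? c ≠ none := by
        have := hinv c
        rw [Bool.eq_false_iff.mpr hc] at this
        simp [Option.isSome_eq_false_iff, Option.isNone_iff_eq_none] at this
        simp [this]
      simp only [List.foldl_cons, hd, if_false]
      rw [ih _ _ _ (hins d seen hinv)]
      simp only [breaks]
      rw [if_neg hc]

-- reference form of stage 1's output list
def prevList (d : PySem.Dict Char Int) (s : Int) : List Char → List Int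
  | [] => []
  | c :: rest => d.getD c (-1) :: prevList (d.insert c s) (s + 1) rest

theorem stage1_fst (xs : List Char) (s : Int) (d : PySem.Dict Char Int) (acc : List Int) :
    ((PySem.List.enumerate xs s).foldl
      (fun (st : List Int × PySem.Dict Char Int) ic =>
        (st.1 ++ [st.2.getD ic.2 (-1)], st.2.insert ic.2 ic.1))
      (acc, d)).1 = acc ++ prevList d s xs := by
  induction xs generalizing s d acc with
  | nil => simp [PySem.List.enumerate_nil, prevList]
  | cons c rest ih =>
    rw [PySem.List.enumerate_cons]
    simp only [List.foldl_cons]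
    rw [ih]
    simp [prevList]

theorem stage2_eq_breaks (xs : List Char) (s start cnt : Int) (d : PySem.Dict Char Int)
    (seen : PySem.Set Char)
    (h1 : start ≤ s)
    (h2 : ∀ c, d.getD c (-1) < s)
    (h3 : ∀ c, seen.contains c = true ↔ start ≤ d.getD c (-1)) :
    ((PySem.List.enumerate (prevList d s xs) s).foldl
      (fun (st : Int × Int) ip =>
        if st.2 ≤ ip.2 then (st.1 + 1, ip.1) else st)
      (cnt, start)).1 = cnt + breaks seen xs := by
  induction xs generalizing s start cnt d seen with
  | nil => simp [prevList, PySem.List.enumerate_nil, breaks]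
  | cons c rest ih =>
    simp only [prevList, PySem.List.enumerate_cons, List.foldl_cons]
    have hgetD : ∀ x v, ((d.insert c v).getD x (-1)) = if x = c then v else d.getD x (-1) := by
      intro x v
      by_cases hx : x = c
      · subst hx; rw [PySem.Dict.getD_insert_self]; simp
      · rw [PySem.Dict.getD_insert_of_ne d v (-1) hx]; simp [hx]
    by_cases hdup : start ≤ d.getD c (-1)
    · -- duplicate: contains c, bump cnt, start := s
      have hc : seen.contains c = true := (h3 c).mpr hdup
      rw [if_pos hdup]
      have h2' : ∀ x, (d.insert c s).getD x (-1) < s + 1 := by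
        intro x; rw [hgetD]
        split
        · omega
        · exact lt_trans (h2 x) (by omega)
      have h3' : ∀ x, (PySem.Set.empty.add c).contains x = true ↔ s ≤ (d.insert c s).getD x (-1) := by
        intro x
        rw [PySem.Set.contains_iff, PySem.Set.mem_add, hgetD]
        constructor
        · rintro (hx | rfl)
          · exact absurd hx (by simp [PySem.Set.empty])
          · simp
        · intro hx
          by_cases hxc : x = c
          · exact Or.inr hxc
          · rw [if_neg hxc] at hx
            exact absurd hx (by have := h2 x; omega)
      rw [ih (s + 1) s (cnt + 1) _ _ (by omega) h2' h3']
      simp only [breaks, if_pos hc]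
      ring
    · -- no duplicate: state unchanged, seen gains c
      have hc : ¬ seen.contains c = true := fun h => hdup ((h3 c).mp h)
      rw [if_neg hdup]
      have h2' : ∀ x, (d.insert c s).getD x (-1) < s + 1 := by
        intro x; rw [hgetD]
        split
        · omega
        · exact lt_trans (h2 x) (by omega)
      have h3' : ∀ x, (seen.add c).contains x = true ↔ start ≤ (d.insert c s).getD x (-1) := by
        intro x
        rw [PySem.Set.contains_iff, PySem.Set.mem_add, hgetD]
        by_cases hxc : x = c
        · subst hxc
          rw [if_pos rfl]
          exact ⟨fun _ => h1, fun _ => Or.inr rfl⟩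
        · rw [if_neg hxc]
          rw [← PySem.Set.contains_iff, h3 x]
          exact ⟨fun h' => (h'.resolve_right hxc), Or.inl⟩
      rw [ih (s + 1) start cnt _ _ (by omega) h2' h3']
      simp only [breaks, Bool.eq_false_iff.mpr hc]
      simp

-- ===== VERDICT =====
theorem solution_spec : Claim_equal_solution := by
  intro S _
  unfold Spec_solution solution solution_alt
  simp only []
  rw [stage1_fst S.toList 0 PySem.Dict.empty []]
  rw [List.nil_append]
  rw [stage2_eq_breaks S.toList 0 0 1 PySem.Dict.empty PySem.Set.empty
    (le_refl 0)
    (fun c => by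
      rw [show (PySem.Dict.empty : PySem.Dict Char Int).getD c (-1) = -1 from rfl]; omega)
    (fun c => by
      rw [show (PySem.Dict.empty : PySem.Dict Char Int).getD c (-1) = -1 from rfl]
      rw [show (PySem.Set.empty : PySem.Set Char).contains c = false from rfl]
      simp)]
  exact foldA_eq_breaks S.toList PySem.Dict.empty PySem.Set.empty 1 (fun c => rfl)
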